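-- pv_equiv track=rewrite | github.com/szakeri/f5-openstack-test | f5_os_test/order_utils.py | order_by_weights
-- ===== SOURCE A (Python) =====
-- def order_by_weights(unordered, weights_table):
--     '''(iterable, wieghts) --> iterable_ordered_by_weights
--
--     AGENT_LB_DEL_ORDER is an example weights table.  Pass it as the second
--     argument where the first is a list of BigIP device URIs and it will return
--     a list with the resources in the appropriate order for deletion.
--     Note that URIS that do not match a key in the weights table are set to have
--     the same "high" weight.   Their relative order will not change.
--
--     >>> order_by_weights([URI1, URI2, ...], AGENT_LB_DEL_ORDER)
--     [URI2, URI1, ....]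
--     '''
--     min_minus_one = min(weights_table.values()) - 1
--
--     def order_key(item):
--         for k in weights_table:
--             if k in item:
--                 return weights_table[k]
--         return min_minus_one
--     ordered_by_weights = sorted(list(unordered), key=order_key)
--     return ordered_by_weights
-- ===== SOURCE B (Python) =====
-- def order_by_weights(unordered, weights_table):
--     # Bucket (counting) sort: group items by weight once, then concatenate
--     # buckets in ascending weight order; min() is computed eagerly like A.
--     default = min(weights_table.values()) - 1
--
--     def weight_of(item):
--         for k in weights_table:
--             if k in item:
--                 return weights_table[k]
--         return default
--
--     buckets = {}
--     for item in unordered: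
--         w = weight_of(item)
--         buckets[w] = buckets.get(w, []) + [item]
--     result = []
--     for w in sorted(buckets):
--         result.extend(buckets.get(w, []))
--     return result
-- ===== Notes on version B (the rewrite author's own statement) =====
-- stated objective: alternative
-- what changed: Replaces sorted(key=order_key) by a stable bucket sort: one pass groups items into a dict weight -> list (preserving input order), then buckets are concatenated in ascending weight order; the eager min() over the weights table is kept.
import Mathlib
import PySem

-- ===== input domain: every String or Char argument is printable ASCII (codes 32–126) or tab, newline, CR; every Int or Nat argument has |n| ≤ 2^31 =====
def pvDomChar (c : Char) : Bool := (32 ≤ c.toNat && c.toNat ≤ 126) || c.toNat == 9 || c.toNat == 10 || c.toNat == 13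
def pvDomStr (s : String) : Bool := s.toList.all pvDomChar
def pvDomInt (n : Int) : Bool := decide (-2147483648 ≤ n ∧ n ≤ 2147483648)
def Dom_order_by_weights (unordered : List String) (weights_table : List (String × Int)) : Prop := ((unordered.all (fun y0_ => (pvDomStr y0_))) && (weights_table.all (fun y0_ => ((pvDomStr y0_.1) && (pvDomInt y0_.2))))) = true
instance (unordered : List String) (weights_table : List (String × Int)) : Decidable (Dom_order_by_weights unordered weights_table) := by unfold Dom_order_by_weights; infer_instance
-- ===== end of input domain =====

-- B replaces A's comparison sort (sorted with a key) by a stable bucket sort: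
-- group items by weight in one pass, then concatenate buckets in ascending
-- weight order; same return value (objective: alternative, not measured faster).

-- ===== PORT A =====
-- shared inner scan of both Pythons: 'for k in weights_table: if k in item: return weights_table[k]' / 'return min-1'
-- (for k drawn from d.keys the lookup weights_table[k] always succeeds, so getD's default is never used)
def pvWeight (d : PySem.Dict String Int) (mm1 : Int) : List String → String → Int
  | [], _ => mm1
  | k :: rest, item => if PySem.Str.isIn k item then d.getD k mm1 else pvWeight d mm1 rest item

def order_by_weights (unordered : List String) (weights_table : List (String × Int)) : List String :=
  let d := PySem.Dict.mk weights_table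
  -- min(weights_table.values()) raises ValueError on an empty dict: excluded by Pre_; '.getD 0' is unreached there
  let mm1 := (PySem.List.min? d.values (fun v => v)).getD 0 - 1
  PySem.List.sorted unordered (fun item => pvWeight d mm1 d.keys item) false

-- ===== PORT B =====
def order_by_weights_alt (unordered : List String) (weights_table : List (String × Int)) : List String :=
  let d := PySem.Dict.mk weights_table
  -- same eager min() as A: raises ValueError on an empty dict (excluded by Pre_)
  let mm1 := (PySem.List.min? d.values (fun v => v)).getD 0 - 1
  let buckets := unordered.foldl
    (fun b item => b.modify (pvWeight d mm1 d.keys item) [] (fun l => l ++ [item]))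
    PySem.Dict.empty
  (PySem.List.sorted buckets.keys (fun w => w) false).foldl
    (fun acc w => acc ++ buckets.getD w []) []

-- ===== PRECONDITION & SPEC =====
-- Pre_ excludes only the empty weights table, on which A (and B) raise ValueError from min().
def Pre_order_by_weights (unordered : List String) (weights_table : List (String × Int)) : Prop :=
  weights_table ≠ []
instance (unordered : List String) (weights_table : List (String × Int)) : Decidable (Pre_order_by_weights unordered weights_table) := by unfold Pre_order_by_weights; infer_instance
def pvWitness_order_by_weights : List String × (List (String × Int)) := (["ab", "zz", "b!"], [("a", 2), ("b", 1)])

def Spec_order_by_weights (unordered : List String) (weights_table : List (String × Int)) (out : List String) : Prop := out = order_by_weights_alt unordered weights_table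
instance (unordered : List String) (weights_table : List (String × Int)) (out : List String) : Decidable (Spec_order_by_weights unordered weights_table out) := by unfold Spec_order_by_weights; infer_instance

-- ===== CLAIM (what is proved, stated in full; the proofs are below) =====
def Claim_equal_order_by_weights : Prop := ∀ (unordered : List String) (weights_table : List (String × Int)), Dom_order_by_weights unordered weights_table → Pre_order_by_weights unordered weights_table → Spec_order_by_weights unordered weights_table (order_by_weights unordered weights_table)

-- ===== LEMMAS AND PROOFS =====

theorem pv_insertBy_all_before {α : Type} (bef : α → α → Bool) (x : α) (l : List α)
    (h : ∀ y ∈ l, bef x y = true) :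
    PySem.List.insertBy bef x l = x :: l := by
  cases l with
  | nil => simp [PySem.List.insertBy]
  | cons y ys => simp [PySem.List.insertBy, h y (by simp)]

theorem pv_insertBy_append_not {α : Type} (bef : α → α → Bool) (x : α) (l1 l2 : List α)
    (h : ∀ y ∈ l1, bef x y = false) :
    PySem.List.insertBy bef x (l1 ++ l2) = l1 ++ PySem.List.insertBy bef x l2 := by
  induction l1 with
  | nil => simp
  | cons y ys ih =>
    have hy : bef x y = false := h y (by simp)
    simp [PySem.List.insertBy, hy, ih (fun z hz => h z (by simp [hz]))]

theorem pv_flatMap_congr {α β : Type} (l : List α) (f g : α → List β)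
    (h : ∀ w ∈ l, f w = g w) : l.flatMap f = l.flatMap g := by
  induction l with
  | nil => rfl
  | cons w ws ih =>
    simp only [List.flatMap_cons, h w (by simp), ih (fun z hz => h z (by simp [hz]))]

-- inserting a into the bucket decomposition lands exactly at the end of a's bucket
theorem pv_insertBy_flatMap (key : String → Int) (a : String) :
    ∀ (ws : List Int) (g : Int → List String),
      ws.Pairwise (· < ·) → (∀ w ∈ ws, ∀ x ∈ g w, key x = w) → key a ∈ ws →
      PySem.List.insertBy (fun p q => decide (key p < key q)) a (ws.flatMap g) =
        ws.flatMap (fun w => g w ++ if key a == w then [a] else []) := by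
  intro ws
  induction ws with
  | nil => intro g _ _ hmem; simp at hmem
  | cons w rest ih =>
    intro g hpw hg hmem
    have hlt : ∀ w' ∈ rest, w < w' := (List.pairwise_cons.mp hpw).1
    have hgw : ∀ x ∈ g w, key x = w := hg w (by simp)
    rcases (by simpa using hmem : key a = w ∨ key a ∈ rest) with heq | hrest
    · -- a belongs to the first bucket: goes after g w, before all later buckets
      have h1 : ∀ y ∈ g w, (decide (key a < key y)) = false := by
        intro y hy; simp [hgw y hy, heq]
      have h2 : ∀ y ∈ rest.flatMap g, (decide (key a < key y)) = true := by
        intro y hy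
        rcases List.mem_flatMap.mp hy with ⟨w', hw', hyw'⟩
        have := hg w' (by simp [hw']) y hyw'
        simp [this, heq]; exact hlt w' hw'
      rw [List.flatMap_cons, pv_insertBy_append_not _ _ _ _ h1,
          pv_insertBy_all_before _ _ _ h2, List.flatMap_cons]
      have hrest0 : rest.flatMap (fun w' => g w' ++ if key a == w' then [a] else []) = rest.flatMap g := by
        apply pv_flatMap_congr
        intro w' hw'
        have : key a ≠ w' := by rw [heq]; exact ne_of_lt (hlt w' hw')
        simp [this]
      rw [hrest0]
      simp [heq]
    · -- a belongs to a later bucket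
      have hwa : w < key a := hlt _ hrest
      have h1 : ∀ y ∈ g w, (decide (key a < key y)) = false := by
        intro y hy; simp [hgw y hy]; omega
      rw [List.flatMap_cons, pv_insertBy_append_not _ _ _ _ h1,
          ih g (List.pairwise_cons.mp hpw).2 (fun z hz => hg z (by simp [hz])) hrest,
          List.flatMap_cons]
      have : key a ≠ w := by omega
      simp [this]

-- the stable sort is the bucket decomposition over any strictly increasing cover of the keys
theorem pv_sorted_eq_flatMap (key : String → Int) (xs : List String) (ws : List Int)
    (hpw : ws.Pairwise (· < ·)) (hcov : ∀ x ∈ xs, key x ∈ ws) :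
    PySem.List.sorted xs key false = ws.flatMap (fun w => xs.filter (fun x => key x == w)) := by
  induction xs using List.reverseRecOn with
  | nil => simp [PySem.List.sorted_eq_foldl_insertBy]
  | append_singleton xs a ih =>
    have hcov' : ∀ x ∈ xs, key x ∈ ws := fun x hx => hcov x (by simp [hx])
    have hstep : PySem.List.sorted (xs ++ [a]) key false =
        PySem.List.insertBy (fun p q => decide (key p < key q)) a (PySem.List.sorted xs key false) := by
      rw [PySem.List.sorted_eq_foldl_insertBy, PySem.List.sorted_eq_foldl_insertBy,
          List.foldl_append]
      rfl
    rw [hstep, ih hcov',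
        pv_insertBy_flatMap key a ws _ hpw
          (fun w _ x hx => by simpa using (List.of_mem_filter hx))
          (hcov a (by simp))]
    apply pv_flatMap_congr
    intro w _
    by_cases h : key a = w
    · simp [List.filter_append, List.filter, h]
    · have hb : (key a == w) = false := by simpa using h
      simp [List.filter_append, List.filter, hb]

theorem order_by_weights_equal (unordered : List String) (weights_table : List (String × Int)) :
    order_by_weights unordered weights_table = order_by_weights_alt unordered weights_table := by
  unfold order_by_weights order_by_weights_alt
  set d := PySem.Dict.mk weights_table with hd
  set mm1 := (PySem.List.min? d.values (fun v => v)).getD 0 - 1 with hmm1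
  set key := fun item => pvWeight d mm1 d.keys item with hkey
  set buckets := unordered.foldl
      (fun b item => b.modify (key item) [] (fun l => l ++ [item])) PySem.Dict.empty with hb
  -- B's final loop is a flatMap over the sorted bucket keys
  rw [PySem.List.foldl_append_eq_flatMap]
  -- the bucket keys are the distinct weights, in first-occurrence order
  have hkeys : buckets.keys = PySem.Set.ofList (unordered.map key) := by
    rw [hb, PySem.Dict.keys_foldl_modify_key unordered key [] (fun _ item => fun l => l ++ [item])]
    rw [PySem.Set.ofList_eq_foldl]
    rfl
  -- each bucket is the input filtered to that weight
  have hbucket : ∀ w : Int, buckets.getD w [] = unordered.filter (fun x => key x == w) := by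
    intro w
    have hfold : buckets = List.foldl (fun b p => b.modify p.1 [] (fun l => l ++ [p.2]))
        PySem.Dict.empty (unordered.map (fun x => (key x, x))) := by
      rw [hb, List.foldl_map]
    rw [hfold, PySem.Dict.getD_foldl_modify_append]
    simp [List.filter_map, List.map_map, Function.comp_def]
  have hflat : (PySem.List.sorted buckets.keys (fun w => w) false).flatMap (fun w => buckets.getD w []) =
      (PySem.List.sorted buckets.keys (fun w => w) false).flatMap (fun w => unordered.filter (fun x => key x == w)) :=
    pv_flatMap_congr _ _ _ (fun w _ => hbucket w)
  rw [List.nil_append, hflat, hkeys]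
  exact pv_sorted_eq_flatMap key unordered _
    (PySem.List.sorted_ofList_pairwise_lt _)
    (fun x hx => by
      rw [PySem.List.mem_sorted, PySem.Set.mem_ofList]
      exact List.mem_map_of_mem hx)

-- ===== VERDICT (by name: the statement is the Claim_ definition above) =====
theorem order_by_weights_spec : Claim_equal_order_by_weights := by
  intro unordered weights_table _ _
  unfold Spec_order_by_weights
  exact order_by_weights_equal unordered weights_table
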